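-- pv_equiv track=rewrite | github.com/anza21/superior-agents-suggestoai-collaboration | agent/scripts/tts_helper.py | split_script_by_voice
-- ===== SOURCE A (Python) =====
-- def split_script_by_voice(script):
--     # Returns list of (voice, text) tuples
--     lines = script.strip().split("\n")
--     result = []
--     current_voice = "en-US-Wavenet-D"  # Default male
--     buffer = []
--     for line in lines:
--         if line.strip().startswith("[Male Voice]"):
--             if buffer:
--                 result.append((current_voice, " ".join(buffer)))
--                 buffer = []
--             current_voice = "en-US-Wavenet-D"
--         elif line.strip().startswith("[Female Voice]"):
--             if buffer:
--                 result.append((current_voice, " ".join(buffer)))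
--                 buffer = []
--             current_voice = "en-US-Wavenet-F"
--         else:
--             buffer.append(line.strip())
--     if buffer:
--         result.append((current_voice, " ".join(buffer)))
--     return result
-- ===== SOURCE B (Python) =====
-- # B: recursive descent that cuts the stripped line list at the first marker,
-- # instead of A's single fold with a (result, voice, buffer) accumulator.
--
-- def _voice_of(ln):
--     if ln.startswith("[Male Voice]"):
--         return "en-US-Wavenet-D"
--     if ln.startswith("[Female Voice]"):
--         return "en-US-Wavenet-F"
--     return None
--
--
-- def _chunk(voice, lines):
--     return [(voice, " ".join(lines))] if lines else []
--
--
-- def _emit(voice, lines):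
--     i = 0
--     while i < len(lines) and _voice_of(lines[i]) is None:
--         i += 1
--     if i == len(lines):
--         return _chunk(voice, lines)
--     return _chunk(voice, lines[:i]) + _emit(_voice_of(lines[i]), lines[i + 1:])
--
--
-- def split_script_by_voice(script):
--     lines = [ln.strip() for ln in script.strip().split("\n")]
--     return _emit("en-US-Wavenet-D", lines)
-- ===== Notes on version B (the rewrite author's own statement) =====
-- stated objective: alternative
-- what changed: A single fold carrying a (result, current_voice, buffer) accumulator is replaced by pre-stripping all lines once and a recursive descent that cuts the line list at the first marker, emitting each chunk by slicing.
import Mathlib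
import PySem

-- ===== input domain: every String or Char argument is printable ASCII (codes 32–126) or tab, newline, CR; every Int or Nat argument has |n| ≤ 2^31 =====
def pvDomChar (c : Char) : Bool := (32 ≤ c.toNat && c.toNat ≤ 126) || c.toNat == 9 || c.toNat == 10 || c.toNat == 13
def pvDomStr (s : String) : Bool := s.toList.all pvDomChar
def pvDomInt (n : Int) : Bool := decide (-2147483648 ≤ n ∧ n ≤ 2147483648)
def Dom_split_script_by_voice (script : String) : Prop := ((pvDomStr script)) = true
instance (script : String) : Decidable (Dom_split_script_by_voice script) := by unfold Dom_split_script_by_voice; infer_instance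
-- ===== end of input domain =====

-- B changes the decomposition: recursive descent that cuts the stripped line list at the first
-- marker, instead of A's single fold with a (result, voice, buffer) accumulator; objective: alternative.

-- ===== PORT A =====
-- one loop step of A: state is (result, current_voice, buffer)
def pvStepA (st : List (String × String) × String × List String) (line : String) :
    List (String × String) × String × List String :=
  let result := st.1; let voice := st.2.1; let buffer := st.2.2
  if PySem.Str.startswith (PySem.Str.strip line) "[Male Voice]" then
    if buffer.isEmpty then (result, "en-US-Wavenet-D", buffer)
    else (result ++ [(voice, PySem.Str.join " " buffer)], "en-US-Wavenet-D", [])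
  else if PySem.Str.startswith (PySem.Str.strip line) "[Female Voice]" then
    if buffer.isEmpty then (result, "en-US-Wavenet-F", buffer)
    else (result ++ [(voice, PySem.Str.join " " buffer)], "en-US-Wavenet-F", [])
  else (result, voice, buffer ++ [PySem.Str.strip line])

def split_script_by_voice (script : String) : List (String × String) :=
  -- s.split("\n"): the separator is non-empty, so Str.split? always returns some; getD [] is exact
  let lines := (PySem.Str.split? (PySem.Str.strip script) "\n").getD []
  let st := lines.foldl pvStepA ([], "en-US-Wavenet-D", [])
  if st.2.2.isEmpty then st.1
  else st.1 ++ [(st.2.1, PySem.Str.join " " st.2.2)]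

-- ===== PORT B =====
def pvVoiceOf (ln : String) : Option String :=
  if PySem.Str.startswith ln "[Male Voice]" then some "en-US-Wavenet-D"
  else if PySem.Str.startswith ln "[Female Voice]" then some "en-US-Wavenet-F"
  else none

def pvChunk (voice : String) (lines : List String) : List (String × String) :=
  if lines.isEmpty then [] else [(voice, PySem.Str.join " " lines)]

-- _emit: the while loop finds the first marker index i, so lines[:i] / lines[i:] are takeWhile / dropWhile
def pvEmit (voice : String) (lines : List String) : List (String × String) :=
  match h : lines.dropWhile (fun l => (pvVoiceOf l).isNone) with
  | [] => pvChunk voice lines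
  | m :: rest =>
      pvChunk voice (lines.takeWhile (fun l => (pvVoiceOf l).isNone)) ++
        pvEmit ((pvVoiceOf m).getD "") rest
termination_by lines.length
decreasing_by
  have hle := List.length_dropWhile_le (p := fun l => (pvVoiceOf l).isNone) (l := lines)
  rw [h] at hle; simp at hle; omega

def split_script_by_voice_alt (script : String) : List (String × String) :=
  let lines := ((PySem.Str.split? (PySem.Str.strip script) "\n").getD []).map PySem.Str.strip
  pvEmit "en-US-Wavenet-D" lines

-- ===== PRECONDITION & SPEC =====
def Spec_split_script_by_voice (script : String) (out : List (String × String)) : Prop := out = split_script_by_voice_alt script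
instance (script : String) (out : List (String × String)) : Decidable (Spec_split_script_by_voice script out) := by unfold Spec_split_script_by_voice; infer_instance

-- ===== CLAIM (what is proved, stated in full; the proofs are below) =====
def Claim_equal_split_script_by_voice : Prop := ∀ (script : String), Dom_split_script_by_voice script → Spec_split_script_by_voice script (split_script_by_voice script)

-- ===== LEMMAS AND PROOFS =====

def pvFinish (st : List (String × String) × String × List String) : List (String × String) :=
  if st.2.2.isEmpty then st.1 else st.1 ++ [(st.2.1, PySem.Str.join " " st.2.2)]

-- A's loop+final-flush, written recursively over the remaining lines (proof-side only)
def pvFA (voice : String) (buf : List String) : List String → List (String × String)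
  | [] => if buf.isEmpty then [] else [(voice, PySem.Str.join " " buf)]
  | l :: ls =>
      match pvVoiceOf (PySem.Str.strip l) with
      | some v =>
          (if buf.isEmpty then [] else [(voice, PySem.Str.join " " buf)]) ++ pvFA v [] ls
      | none => pvFA voice (buf ++ [PySem.Str.strip l]) ls

lemma pvStepA_eq (st : List (String × String) × String × List String) (line : String) :
    pvStepA st line =
      match pvVoiceOf (PySem.Str.strip line) with
      | some v => (st.1 ++ (if st.2.2.isEmpty then [] else [(st.2.1, PySem.Str.join " " st.2.2)]),
                   v, if st.2.2.isEmpty then st.2.2 else [])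
      | none => (st.1, st.2.1, st.2.2 ++ [PySem.Str.strip line]) := by
  unfold pvStepA pvVoiceOf
  split_ifs <;> simp_all

lemma pvFold_eq (ls : List String) : ∀ (res : List (String × String)) (v : String) (buf : List String),
    pvFinish (ls.foldl pvStepA (res, v, buf)) = res ++ pvFA v buf ls := by
  induction ls with
  | nil => intro res v buf; by_cases h : buf.isEmpty <;> simp [pvFinish, pvFA, h]
  | cons l ls ih =>
      intro res v buf
      rw [List.foldl_cons, pvStepA_eq]
      cases hv : pvVoiceOf (PySem.Str.strip l) with
      | none => simp only [pvFA, hv]; exact ih res v (buf ++ [PySem.Str.strip l])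
      | some v' =>
          simp only [pvFA, hv]
          by_cases h : buf.isEmpty
          · have hb : buf = [] := by simpa using h
            subst hb
            simpa using ih res v' []
          · rw [if_neg h, if_neg h, ih (res ++ [(v, PySem.Str.join " " buf)]) v' []]
            simp

lemma pv_dropWhile_all {α : Type} (p : α → Bool) (buf xs : List α) (h : ∀ b ∈ buf, p b) :
    (buf ++ xs).dropWhile p = xs.dropWhile p := by
  induction buf with
  | nil => rfl
  | cons b buf ih => simp_all

lemma pv_takeWhile_all {α : Type} (p : α → Bool) (buf xs : List α) (h : ∀ b ∈ buf, p b) :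
    (buf ++ xs).takeWhile p = buf ++ xs.takeWhile p := by
  induction buf with
  | nil => rfl
  | cons b buf ih => simp_all

lemma pvEmit_no_marker (v : String) (buf : List String)
    (h : ∀ b ∈ buf, (pvVoiceOf b).isNone) : pvEmit v buf = pvChunk v buf := by
  rw [pvEmit.eq_def]
  split
  · rfl
  · rename_i m rest hd
    have : buf.dropWhile (fun l => (pvVoiceOf l).isNone) = [] := by
      rw [List.dropWhile_eq_nil_iff]; intro x hx; exact h x hx
    simp [this] at hd

lemma pvEmit_cons_marker (v : String) (buf : List String) (m : String) (rest : List String)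
    (hbuf : ∀ b ∈ buf, (pvVoiceOf b).isNone) (hm : (pvVoiceOf m).isNone = false) :
    pvEmit v (buf ++ m :: rest) = pvChunk v buf ++ pvEmit ((pvVoiceOf m).getD "") rest := by
  have hd : (buf ++ m :: rest).dropWhile (fun l => (pvVoiceOf l).isNone) = m :: rest := by
    rw [pv_dropWhile_all _ _ _ hbuf, List.dropWhile_cons, hm]; simp
  have ht : (buf ++ m :: rest).takeWhile (fun l => (pvVoiceOf l).isNone) = buf := by
    rw [pv_takeWhile_all _ _ _ hbuf, List.takeWhile_cons, hm]; simp
  rw [pvEmit.eq_def]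
  split
  · rename_i h0; rw [hd] at h0; exact absurd h0 (by simp)
  · rename_i m' rest' h0
    rw [hd] at h0
    cases h0
    rw [ht]

lemma pvFA_eq_emit (ls : List String) : ∀ (v : String) (buf : List String),
    (∀ b ∈ buf, (pvVoiceOf b).isNone) →
    pvFA v buf ls = pvEmit v (buf ++ ls.map PySem.Str.strip) := by
  induction ls with
  | nil =>
      intro v buf h
      rw [List.map_nil, List.append_nil, pvEmit_no_marker v buf h]
      simp [pvFA, pvChunk]
  | cons l ls ih =>
      intro v buf h
      simp only [pvFA, List.map_cons]
      cases hv : pvVoiceOf (PySem.Str.strip l) with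
      | some v' =>
          rw [pvEmit_cons_marker v buf _ _ h (by simp [hv]), hv]
          have hrec := ih v' [] (by intro b hb; cases hb)
          simp only [List.nil_append] at hrec
          simp [pvChunk, hrec]
      | none =>
          rw [ih v (buf ++ [PySem.Str.strip l])
              (by intro b hb
                  rcases List.mem_append.1 hb with hb | hb
                  · exact h b hb
                  · simp at hb; subst hb; simp [hv])]
          simp

-- ===== VERDICT (by name: the statement is the Claim_ definition above) =====
theorem split_script_by_voice_spec : Claim_equal_split_script_by_voice := by
  intro script _
  show split_script_by_voice script = split_script_by_voice_alt script
  unfold split_script_by_voice split_script_by_voice_alt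
  have h1 := pvFold_eq ((PySem.Str.split? (PySem.Str.strip script) "\n").getD [])
      [] "en-US-Wavenet-D" []
  have h2 := pvFA_eq_emit ((PySem.Str.split? (PySem.Str.strip script) "\n").getD [])
      "en-US-Wavenet-D" [] (by intro b hb; cases hb)
  simp only [pvFinish] at h1
  simp only [List.nil_append] at h1 h2
  rw [h1, h2]
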